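-- pv_equiv track=rewrite | github.com/barryptak/AdventOfCode | 2015/15.py | get_combo_score
-- ===== SOURCE A (Python) =====
-- from math import prod
--
-- def get_combo_score(combo, ingredients, calorie_target=None):
--     """
--     Calculates the score for a given combination of ingredients.
--     If calorie_target is supplied then combinations NOT meeting calorie_target
--     will get a score of 0.
--     """
--     # Calculate the total value for each cookie property
--     values = [0]*len(ingredients[0])
--     for count, ingredient in zip(combo, ingredients):
--         for i, prop in enumerate(ingredient):
--             values[i] += prop * count
--
--     # If we have a calorie target and don't match it then return 0 as we're
--     # not interestedi in cookies that have the incorrect calorie count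
--     if calorie_target is not None and values[-1] != calorie_target:
--         return 0
--
--     # The final score is the product of all properties (apart from calories)
--     # with any property values < 0 resulting in a zero overall
--     return prod([max(0, v) for v in values[:-1]])
-- ===== SOURCE B (Python) =====
-- def get_combo_score(combo, ingredients, calorie_target=None):
--     """
--     Staged short-circuit evaluation: check only the calorie column first and
--     bail out early, then multiply per-property totals one at a time, returning
--     0 as soon as a non-positive total appears. No accumulator array is built.
--     """
--     num_props = len(ingredients[0])
--     pairs = list(zip(combo, ingredients))
--
--     if calorie_target is not None:
--         calories = sum(row[num_props - 1] * count for count, row in pairs)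
--         if calories != calorie_target:
--             return 0
--
--     score = 1
--     for i in range(num_props - 1):
--         total = sum(row[i] * count for count, row in pairs)
--         if total <= 0:
--             return 0
--         score *= total
--     return score
-- ===== Notes on version B (the rewrite author's own statement) =====
-- stated objective: alternative
-- what changed: B replaces A's build-values-array-then-product pipeline with staged short-circuit evaluation: it checks only the calorie column first and returns 0 early, then multiplies per-property totals one at a time, returning 0 as soon as a non-positive total appears; no values array is ever built.
-- outside the precondition, e.g. on get_combo_score([1, 1], [[1, 2, 3], [4]], None): A returns 10, B raises IndexError
import Mathlib
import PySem

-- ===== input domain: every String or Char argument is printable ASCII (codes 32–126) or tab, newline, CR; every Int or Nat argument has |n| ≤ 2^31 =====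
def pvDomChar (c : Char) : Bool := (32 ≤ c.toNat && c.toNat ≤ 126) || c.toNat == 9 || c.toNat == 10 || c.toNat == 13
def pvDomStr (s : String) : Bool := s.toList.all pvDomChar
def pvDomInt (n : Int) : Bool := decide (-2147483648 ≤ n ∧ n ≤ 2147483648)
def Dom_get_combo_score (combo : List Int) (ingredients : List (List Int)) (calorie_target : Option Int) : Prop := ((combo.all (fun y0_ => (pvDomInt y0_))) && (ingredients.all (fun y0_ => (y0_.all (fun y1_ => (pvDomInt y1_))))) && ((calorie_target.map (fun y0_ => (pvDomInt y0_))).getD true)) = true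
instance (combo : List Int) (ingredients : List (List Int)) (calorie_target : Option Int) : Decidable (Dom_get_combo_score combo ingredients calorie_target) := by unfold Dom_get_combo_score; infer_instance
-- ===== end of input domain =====

-- B replaces A's values-array-then-product pipeline with staged short-circuit
-- evaluation (calorie column checked first, per-property totals multiplied with
-- early exit on a non-positive total); objective: alternative, same cost.

-- ===== PORT A =====
-- inner loop: for i, prop in enumerate(ingredient): values[i] += prop * count
def pvAInner (count : Int) (values : List Int) (ingredient : List Int) : List Int :=
  (PySem.List.enumerate ingredient 0).foldl
    (fun vs q => PySem.List.pySetD vs q.1 (PySem.List.pyGetD vs q.1 0 + q.2 * count)) values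

def get_combo_score (combo : List Int) (ingredients : List (List Int)) (calorie_target : Option Int) : Int :=
  let values :=
    (combo.zip ingredients).foldl (fun vs p => pvAInner p.1 vs p.2)
      (List.replicate ((ingredients.headD []).length) 0)
  match calorie_target with
  | some t =>
    if PySem.List.pyGetD values (-1) 0 ≠ t then 0
    else ((PySem.List.slice values none (some (-1))).map (fun v => max 0 v)).prod
  | none => ((PySem.List.slice values none (some (-1))).map (fun v => max 0 v)).prod

-- ===== PORT B =====
-- sum(row[i] * count for count, row in pairs)
def pvColSum (pairs : List (Int × List Int)) (i : Int) : Int :=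
  (pairs.map (fun p => PySem.List.pyGetD p.2 i 0 * p.1)).sum

-- for i in range(num_props - 1): … early return 0 on total <= 0
def pvBLoop (pairs : List (Int × List Int)) : List Nat → Int → Int
  | [], score => score
  | i :: rest, score =>
    let total := pvColSum pairs (i : Int)
    if total ≤ 0 then 0 else pvBLoop pairs rest (score * total)

def get_combo_score_alt (combo : List Int) (ingredients : List (List Int)) (calorie_target : Option Int) : Int :=
  let numProps := (ingredients.headD []).length
  let pairs := combo.zip ingredients
  match calorie_target with
  | some t =>
    if pvColSum pairs ((numProps : Int) - 1) ≠ t then 0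
    else pvBLoop pairs (List.range (numProps - 1)) 1
  | none => pvBLoop pairs (List.range (numProps - 1)) 1

-- ===== PRECONDITION & SPEC =====
-- Pre_ excludes: empty ingredient lists (A raises IndexError on ingredients[0]);
-- ragged rows among those zipped with combo (a longer row makes A raise, a shorter
-- one A silently treats as having zero trailing properties while B raises); and an
-- empty property row with a calorie target (A's values[-1] raises IndexError).
def Pre_get_combo_score (combo : List Int) (ingredients : List (List Int)) (calorie_target : Option Int) : Prop :=
  ingredients ≠ [] ∧
    (∀ r ∈ ingredients.take combo.length, r.length = (ingredients.headD []).length) ∧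
    (calorie_target = none ∨ (ingredients.headD []).length ≠ 0)
instance (combo : List Int) (ingredients : List (List Int)) (calorie_target : Option Int) : Decidable (Pre_get_combo_score combo ingredients calorie_target) := by unfold Pre_get_combo_score; infer_instance

def pvWitness_get_combo_score : List Int × List (List Int) × Option Int :=
  ([1, 2], [[2, 3, 4], [1, -1, 2]], some 8)

def Spec_get_combo_score (combo : List Int) (ingredients : List (List Int)) (calorie_target : Option Int) (out : Int) : Prop := out = get_combo_score_alt combo ingredients calorie_target
instance (combo : List Int) (ingredients : List (List Int)) (calorie_target : Option Int) (out : Int) : Decidable (Spec_get_combo_score combo ingredients calorie_target out) := by unfold Spec_get_combo_score; infer_instance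

-- ===== CLAIM (what is proved, stated in full; the proofs are below) =====
def Claim_equal_get_combo_score : Prop := ∀ (combo : List Int) (ingredients : List (List Int)) (calorie_target : Option Int), Dom_get_combo_score combo ingredients calorie_target → Pre_get_combo_score combo ingredients calorie_target → Spec_get_combo_score combo ingredients calorie_target (get_combo_score combo ingredients calorie_target)

-- ===== LEMMAS AND PROOFS =====

-- A's inner loop is pointwise addition when the row is no longer than the accumulator.
lemma pvAInner_eq_zipWith (count : Int) :
    ∀ (row pre vs : List Int), row.length ≤ vs.length →
    (PySem.List.enumerate row (pre.length : Int)).foldl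
      (fun a q => PySem.List.pySetD a q.1 (PySem.List.pyGetD a q.1 0 + q.2 * count)) (pre ++ vs)
    = pre ++ (List.zipWith (fun v p => v + p * count) vs row ++ vs.drop row.length) := by
  intro row
  induction row with
  | nil => intro pre vs _; simp [PySem.List.enumerate]
  | cons p ps ih =>
    intro pre vs h
    match vs with
    | [] => simp at h
    | v :: vt =>
      rw [PySem.List.enumerate_cons]
      simp only [List.foldl_cons]
      have hget : PySem.List.pyGetD (pre ++ v :: vt) (pre.length : Int) 0 = v := by
        simp [PySem.List.pyGetD_natCast, List.getD_eq_getElem?_getD]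
      have hset : PySem.List.pySetD (pre ++ v :: vt) (pre.length : Int)
          (v + p * count) = pre ++ (v + p * count) :: vt := by
        simp [PySem.List.pySetD_natCast]
      rw [hget, hset]
      have h2 : ps.length ≤ vt.length := by simpa using h
      have := ih (pre ++ [v + p * count]) vt h2
      simp only [List.length_append, List.length_cons, List.length_nil] at this ⊢
      rw [show ((pre.length : Int) + 1) = ((pre.length + 1 : Nat) : Int) by push_cast; ring]
      simpa [List.append_assoc] using this

lemma pvAInner_full (count : Int) (vs row : List Int) (h : row.length = vs.length) :
    pvAInner count vs row = List.zipWith (fun v p => v + p * count) vs row := by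
  have := pvAInner_eq_zipWith count row [] vs (le_of_eq h)
  simpa [pvAInner, h, List.drop_eq_nil_of_le] using this

-- A's accumulator fold, characterised pointwise.
lemma pvAFold_char :
    ∀ (l : List (Int × List Int)) (vs : List Int), (∀ p ∈ l, p.2.length = vs.length) →
    l.foldl (fun vs p => pvAInner p.1 vs p.2) vs
    = (List.range vs.length).map
        (fun i => vs.getD i 0 + (l.map (fun p => p.2.getD i 0 * p.1)).sum) := by
  intro l
  induction l with
  | nil =>
    intro vs _
    simp only [List.foldl_nil, List.map_nil, List.sum_nil, Int.add_zero]
    apply List.ext_getElem (by simp)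
    intro i h1 h2
    simp [List.getD_eq_getElem?_getD, List.getElem?_eq_getElem h1]
  | cons hd tl ih =>
    intro vs h
    have hhd : hd.2.length = vs.length := h hd (List.mem_cons_self ..)
    have hstep : pvAInner hd.1 vs hd.2 = List.zipWith (fun v p => v + p * hd.1) vs hd.2 :=
      pvAInner_full hd.1 vs hd.2 hhd
    have hlen : (List.zipWith (fun v p => v + p * hd.1) vs hd.2).length = vs.length := by
      simp [hhd]
    rw [List.foldl_cons, hstep, ih _ (by intro p hp; rw [hlen]; exact h p (List.mem_cons_of_mem _ hp))]
    rw [hlen]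
    apply List.map_congr_left
    intro i hi
    rw [List.mem_range] at hi
    have : (List.zipWith (fun v p => v + p * hd.1) vs hd.2).getD i 0
        = vs.getD i 0 + hd.2.getD i 0 * hd.1 := by
      have hi2 : i < hd.2.length := hhd ▸ hi
      simp [List.getD_eq_getElem?_getD, hi, hi2]
    rw [this]
    simp [Int.add_assoc]

-- the second component of a zip member comes from the truncated second list
lemma pvMemZipSndTake {α β : Type} : ∀ (xs : List α) (ys : List β) (p : α × β),
    p ∈ xs.zip ys → p.2 ∈ ys.take xs.length := by
  intro xs
  induction xs with
  | nil => simp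
  | cons x xt ih =>
    intro ys p hp
    match ys with
    | [] => simp [List.zip] at hp
    | y :: yt =>
      rw [List.zip_cons_cons, List.mem_cons] at hp
      rcases hp with h | h
      · simp [h]
      · exact List.mem_cons_of_mem _ (ih yt p h)

-- pvColSum at a natural index, without the py indexing
lemma pvColSum_natCast (pairs : List (Int × List Int)) (i : Nat) :
    pvColSum pairs (i : Int) = (pairs.map (fun p => p.2.getD i 0 * p.1)).sum := by
  simp [pvColSum, PySem.List.pyGetD_natCast]

-- B's product loop computes acc times the product of clamped column sums
lemma pvBLoop_char (pairs : List (Int × List Int)) :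
    ∀ (idxs : List Nat) (acc : Int),
    pvBLoop pairs idxs acc = acc * ((idxs.map (fun (i : Nat) => max 0 (pvColSum pairs (i : Int)))).prod) := by
  intro idxs
  induction idxs with
  | nil => intro acc; simp [pvBLoop]
  | cons i rest ih =>
    intro acc
    simp only [pvBLoop, List.map_cons, List.prod_cons]
    by_cases h : pvColSum pairs (i : Int) ≤ 0
    · have hz : max 0 (pvColSum pairs (i : Int)) = 0 := by omega
      rw [if_pos h, hz, Int.zero_mul, Int.mul_zero]
    · have hmax : max 0 (pvColSum pairs (i : Int)) = pvColSum pairs (i : Int) := by omega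
      rw [if_neg h, ih, hmax, Int.mul_assoc]

-- A's values list equals the column sums over range L
lemma pvValues_char (combo : List Int) (ingredients : List (List Int))
    (htk : ∀ r ∈ ingredients.take combo.length, r.length = (ingredients.headD []).length) :
    (combo.zip ingredients).foldl (fun vs p => pvAInner p.1 vs p.2)
      (List.replicate ((ingredients.headD []).length) 0)
    = (List.range ((ingredients.headD []).length)).map
        (fun (i : Nat) => pvColSum (combo.zip ingredients) (i : Int)) := by
  set L := (ingredients.headD []).length with hL
  have hzl : ∀ p ∈ combo.zip ingredients, p.2.length = (List.replicate L (0:Int)).length := by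
    intro p hp
    rw [List.length_replicate]
    exact htk p.2 (pvMemZipSndTake combo ingredients p hp)
  rw [pvAFold_char _ _ hzl, List.length_replicate]
  apply List.map_congr_left
  intro i hi
  rw [List.mem_range] at hi
  have hrep : (List.replicate L (0:Int)).getD i 0 = 0 := by
    simp [List.getD_eq_getElem?_getD, List.getElem?_replicate]
    split <;> rfl
  rw [hrep, Int.zero_add, pvColSum_natCast]

-- dropping the last element of range (k+1) gives range k, through a map
lemma pvDropLast_map_range {α : Type} (f : Nat → α) (L : Nat) :
    ((List.range L).map f).dropLast = (List.range (L - 1)).map f := by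
  match L with
  | 0 => simp
  | Nat.succ k =>
    rw [List.range_succ, List.map_append]
    simp

-- ===== VERDICT (by name: the statement is the Claim_ definition above) =====
theorem get_combo_score_spec : Claim_equal_get_combo_score := by
  intro combo ingredients calorie_target _ hpre
  obtain ⟨hne, htk, hct⟩ := hpre
  unfold Spec_get_combo_score get_combo_score get_combo_score_alt
  rw [pvValues_char combo ingredients htk]
  have hprod :
      ((PySem.List.slice ((List.range ((ingredients.headD []).length)).map
          (fun (i : Nat) => pvColSum (combo.zip ingredients) (i : Int))) none (some (-1))).map
        (fun v => max 0 v)).prod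
      = pvBLoop (combo.zip ingredients) (List.range ((ingredients.headD []).length - 1)) 1 := by
    rw [PySem.List.slice_to_neg_one, pvDropLast_map_range, pvBLoop_char, Int.one_mul, List.map_map]
    rfl
  match calorie_target, hct with
  | none, _ => exact hprod
  | some t, hct =>
    have hLpos : (ingredients.headD []).length ≠ 0 := by
      rcases hct with h | h
      · exact absurd h (by simp)
      · exact h
    have hcast : (((ingredients.headD []).length : Int) - 1)
        = (((ingredients.headD []).length - 1 : Nat) : Int) := by
      have : 1 ≤ (ingredients.headD []).length := Nat.one_le_iff_ne_zero.mpr hLpos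
      push_cast [this]; ring
    have hlast : PySem.List.pyGetD ((List.range ((ingredients.headD []).length)).map
          (fun (i : Nat) => pvColSum (combo.zip ingredients) (i : Int))) (-1) 0
        = pvColSum (combo.zip ingredients) (((ingredients.headD []).length : Int) - 1) := by
      have hne' : ((List.range ((ingredients.headD []).length)).map
          (fun (i : Nat) => pvColSum (combo.zip ingredients) (i : Int))) ≠ [] := by
        simp only [ne_eq, List.map_eq_nil_iff, List.range_eq_nil]
        omega
      rw [PySem.List.pyGetD_neg_one _ _ hne', List.getLast_eq_getElem]
      simp only [List.length_map, List.length_range, List.getElem_map, List.getElem_range]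
      rw [hcast]
    show (if PySem.List.pyGetD ((List.range ((ingredients.headD []).length)).map
          (fun (i : Nat) => pvColSum (combo.zip ingredients) (i : Int))) (-1) 0 ≠ t then 0
        else ((PySem.List.slice ((List.range ((ingredients.headD []).length)).map
          (fun (i : Nat) => pvColSum (combo.zip ingredients) (i : Int))) none (some (-1))).map
          (fun v => max 0 v)).prod)
      = if pvColSum (combo.zip ingredients) (((ingredients.headD []).length : Int) - 1) ≠ t then 0
        else pvBLoop (combo.zip ingredients) (List.range ((ingredients.headD []).length - 1)) 1
    rw [hlast]
    split_ifs with h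
    · rfl
    · exact hprod
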